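-- pv_equiv track=rewrite | github.com/A-Charvin/Uyaram | Uyaram.py | _build_pdal_range_filter
-- ===== SOURCE A (Python) =====
-- def _build_pdal_range_filter(selected_codes: list) -> str | None:
--     """
--     Collapse a list of selected class codes into a compact PDAL
--     filters.range limits string.
--     e.g. [1,2,3,5,6] → 'Classification[1:3],Classification[5:6]'
--     Returns None if selected_codes is empty.
--     """
--     if not selected_codes:
--         return None
--
--     codes  = sorted(selected_codes)
--     ranges = []
--     start  = codes[0]
--     end    = codes[0]
--
--     for code in codes[1:]:
--         if code == end + 1:
--             end = code
--         else:
--             ranges.append((start, end))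
--             start = end = code
--     ranges.append((start, end))
--
--     return ",".join(f"Classification[{s}:{e}]" for s, e in ranges)
-- ===== SOURCE B (Python) =====
-- def _build_pdal_range_filter(selected_codes: list) -> str | None:
--     """Collapse codes into a PDAL range string via break-pair analysis:
--     zip the sorted list with its tail, keep the adjacent pairs that are NOT
--     consecutive (the 'breaks'); range starts = first code plus each break's
--     right element, range ends = each break's left element plus the last code;
--     zip starts with ends. No sequential start/end state machine."""
--     if not selected_codes:
--         return None
--     codes = sorted(selected_codes)
--     breaks = [(a, b) for a, b in zip(codes, codes[1:]) if b != a + 1]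
--     starts = [codes[0]] + [b for _, b in breaks]
--     ends = [a for a, _ in breaks] + [codes[-1]]
--     return ",".join(f"Classification[{s}:{e}]" for s, e in zip(starts, ends))
-- ===== Notes on version B (the rewrite author's own statement) =====
-- stated objective: alternative
-- what changed: Replaces A's sequential start/end state machine with an index-free break-pair construction: zip the sorted list with its own tail, filter the non-consecutive adjacent pairs, and pair up the resulting start values (first code plus each break's right element) with the end values (each break's left element plus the last code).
import Mathlib
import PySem

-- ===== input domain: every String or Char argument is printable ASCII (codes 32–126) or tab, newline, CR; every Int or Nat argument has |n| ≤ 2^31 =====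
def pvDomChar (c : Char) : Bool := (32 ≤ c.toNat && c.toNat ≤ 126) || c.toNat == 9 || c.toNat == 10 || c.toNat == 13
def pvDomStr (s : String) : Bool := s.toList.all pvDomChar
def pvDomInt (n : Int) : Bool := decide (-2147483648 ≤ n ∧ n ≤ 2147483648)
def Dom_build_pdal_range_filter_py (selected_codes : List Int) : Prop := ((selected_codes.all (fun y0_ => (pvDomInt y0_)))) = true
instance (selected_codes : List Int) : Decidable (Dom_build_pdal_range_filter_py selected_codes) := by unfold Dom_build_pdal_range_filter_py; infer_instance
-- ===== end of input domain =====

-- B replaces A's forward start/end state machine by a break-pair construction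
-- (filter non-consecutive adjacent pairs of the sorted list, then zip the start
-- values with the end values); objective: alternative.


-- f"Classification[{s}:{e}]" (shared format of the two Pythons' f-strings)
def pvFmtRange (se : Int × Int) : String :=
  "Classification[" ++ PySem.Int.toStr se.1 ++ ":" ++ PySem.Int.toStr se.2 ++ "]"

-- ===== PORT A =====
-- A's loop body: state (ranges, start, end)
def pvStepA (st : List (Int × Int) × Int × Int) (code : Int) : List (Int × Int) × Int × Int :=
  if code = st.2.2 + 1 then (st.1, st.2.1, code)
  else (st.1 ++ [(st.2.1, st.2.2)], code, code)

def build_pdal_range_filter_py (selected_codes : List Int) : Option String :=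
  if selected_codes = [] then none
  else
    let codes := PySem.List.sorted selected_codes (fun x => x) false
    let start0 := PySem.List.pyGetD codes 0 0      -- codes[0]; codes is nonempty here
    let st := (PySem.List.slice codes (some 1) none).foldl pvStepA ([], start0, start0)
    let ranges := st.1 ++ [(st.2.1, st.2.2)]
    some (PySem.Str.join "," (ranges.map pvFmtRange))

-- ===== PORT B =====
def build_pdal_range_filter_py_alt (selected_codes : List Int) : Option String :=
  if selected_codes = [] then none
  else
    let codes := PySem.List.sorted selected_codes (fun x => x) false
    -- [(a, b) for a, b in zip(codes, codes[1:]) if b != a + 1]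
    let breaks := (codes.zip (PySem.List.slice codes (some 1) none)).filter
      (fun ab => decide (ab.2 ≠ ab.1 + 1))
    -- [codes[0]] + [b for _, b in breaks]
    let starts := PySem.List.pyGetD codes 0 0 :: breaks.map Prod.snd
    -- [a for a, _ in breaks] + [codes[-1]]
    let ends := breaks.map Prod.fst ++ [PySem.List.pyGetD codes (-1) 0]
    some (PySem.Str.join "," ((starts.zip ends).map pvFmtRange))

-- ===== PRECONDITION & SPEC =====
def Spec_build_pdal_range_filter_py (selected_codes : List Int) (out : Option String) : Prop := out = build_pdal_range_filter_py_alt selected_codes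
instance (selected_codes : List Int) (out : Option String) : Decidable (Spec_build_pdal_range_filter_py selected_codes out) := by unfold Spec_build_pdal_range_filter_py; infer_instance

-- ===== CLAIM =====
def Claim_equal_build_pdal_range_filter_py : Prop := ∀ (selected_codes : List Int), Dom_build_pdal_range_filter_py selected_codes → Spec_build_pdal_range_filter_py selected_codes (build_pdal_range_filter_py selected_codes)

-- ===== LEMMAS AND PROOFS =====

-- A's loop as a recursion: the range list produced from state (s, e) on the rest of the codes
def pvSpecR (s e : Int) : List Int → List (Int × Int)
  | [] => [(s, e)]
  | c :: cs => if c = e + 1 then pvSpecR s c cs else (s, e) :: pvSpecR c c cs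

lemma pvFoldA (xs : List Int) : ∀ (r : List (Int × Int)) (s e : Int),
    (xs.foldl pvStepA (r, s, e)).1 ++ [((xs.foldl pvStepA (r, s, e)).2.1, (xs.foldl pvStepA (r, s, e)).2.2)]
      = r ++ pvSpecR s e xs := by
  induction xs with
  | nil => intro r s e; simp [pvSpecR]
  | cons c cs ih =>
    intro r s e
    by_cases h : c = e + 1 <;>
      simp [List.foldl_cons, pvStepA, pvSpecR, h, ih]

-- the adjacent break pairs of a list
def pvBreaks (l : List Int) : List (Int × Int) :=
  (l.zip l.tail).filter (fun ab => decide (ab.2 ≠ ab.1 + 1))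

-- B's zip of starts and ends equals A's run decomposition
lemma pvZipBreaks (rest : List Int) : ∀ (s e : Int),
    (s :: (pvBreaks (e :: rest)).map Prod.snd).zip
      ((pvBreaks (e :: rest)).map Prod.fst ++ [(e :: rest).getLast (by simp)])
      = pvSpecR s e rest := by
  induction rest with
  | nil => intro s e; simp [pvBreaks, pvSpecR]
  | cons d rest' ih =>
    intro s e
    have hB : pvBreaks (e :: d :: rest')
        = (if d ≠ e + 1 then [(e, d)] else []) ++ pvBreaks (d :: rest') := by
      by_cases h : d = e + 1 <;> simp [pvBreaks, h]
    have hL : (e :: d :: rest').getLast (by simp) = (d :: rest').getLast (by simp) := by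
      simp [List.getLast]
    by_cases h : d = e + 1
    · rw [hB, if_neg (by simp [h]), List.nil_append, pvSpecR, if_pos h, hL]
      exact ih s d
    · rw [hB, if_pos h, pvSpecR, if_neg h, hL]
      simp only [List.map_cons, List.cons_append, List.nil_append, List.zip_cons_cons]
      rw [ih d d]

-- ===== VERDICT =====
theorem build_pdal_range_filter_py_spec : Claim_equal_build_pdal_range_filter_py := by
  intro selected_codes _
  unfold Spec_build_pdal_range_filter_py
  unfold build_pdal_range_filter_py build_pdal_range_filter_py_alt
  by_cases hempty : selected_codes = []
  · simp [hempty]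
  · simp only [if_neg hempty]
    cases hS : PySem.List.sorted selected_codes (fun x => x) false with
    | nil => exact absurd ((PySem.List.sorted_eq_nil_iff selected_codes (fun x => x) false).mp hS) hempty
    | cons c cs =>
      have h0 : PySem.List.pyGetD (c :: cs) 0 0 = c := by simp [pysem]
      have hlast : PySem.List.pyGetD (c :: cs) (-1) 0 = (c :: cs).getLast (by simp) :=
        PySem.List.pyGetD_neg_one (c :: cs) 0 (by simp)
      rw [h0, PySem.List.slice_from_one, hlast]
      have hA := pvFoldA cs ([] : List (Int × Int)) c c
      simp only [List.nil_append] at hA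
      simp only [List.tail_cons]
      rw [hA]
      show _ = some (PySem.Str.join "," (((c :: (pvBreaks (c :: cs)).map Prod.snd).zip
        ((pvBreaks (c :: cs)).map Prod.fst ++ [(c :: cs).getLast (by simp)])).map pvFmtRange))
      rw [pvZipBreaks cs c c]
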